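-- pv_equiv track=rewrite | github.com/Omzlaw/iot-based-industrial-energy-monitoring-and-predictive-load-management-system | MSc Project/PythonPredictor/export_chapter4_data.py | _process_transfer_success
-- ===== SOURCE A (Python) =====
-- from typing import Dict, Iterable, List, Optional, Sequence, Tuple
--
-- def _process_transfer_success(policy_rows: Sequence[dict]) -> bool:
--     seen_transfer_1 = False
--     seen_transfer_2 = False
--     success = False
--     for row in policy_rows:
--         state = str(row.get("process_state") or "").upper()
--         if state == "TRANSFER_1_TO_2":
--             seen_transfer_1 = True
--         elif state == "TRANSFER_2_TO_1":
--             seen_transfer_2 = True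
--         elif state == "HEAT_TANK2" and seen_transfer_1:
--             success = True
--         elif state in {"HEAT_TANK1", "IDLE"} and seen_transfer_2:
--             success = True
--     return success
-- ===== SOURCE B (Python) =====
-- def _process_transfer_success(policy_rows):
--     states = [str(row.get("process_state") or "").upper() for row in policy_rows]
--
--     def fired(trigger, targets):
--         try:
--             i = states.index(trigger)
--         except ValueError:
--             return False
--         return any(s in targets for s in states[i + 1:])
--
--     return (fired("TRANSFER_1_TO_2", ("HEAT_TANK2",))
--             or fired("TRANSFER_2_TO_1", ("HEAT_TANK1", "IDLE")))
-- ===== Notes on version B (the rewrite author's own statement) =====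
-- stated objective: alternative
-- what changed: Replaces A's single stateful flag-accumulating sweep with a map-to-normalized-states pass followed by two independent first-trigger-index lookups and any() scans over the suffix after each trigger.
import Mathlib
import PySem

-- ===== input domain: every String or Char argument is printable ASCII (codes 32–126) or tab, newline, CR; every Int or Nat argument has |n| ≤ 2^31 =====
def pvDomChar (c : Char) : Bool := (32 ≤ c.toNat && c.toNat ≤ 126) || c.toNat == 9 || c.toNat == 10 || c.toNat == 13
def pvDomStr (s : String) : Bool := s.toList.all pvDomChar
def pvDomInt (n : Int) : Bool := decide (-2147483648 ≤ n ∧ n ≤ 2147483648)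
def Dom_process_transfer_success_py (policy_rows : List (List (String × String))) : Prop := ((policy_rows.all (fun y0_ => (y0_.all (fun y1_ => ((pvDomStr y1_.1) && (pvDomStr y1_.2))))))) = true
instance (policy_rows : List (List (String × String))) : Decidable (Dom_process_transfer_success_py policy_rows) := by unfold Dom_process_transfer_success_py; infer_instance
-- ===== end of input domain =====

-- B replaces A's single flag-accumulating sweep by a normalize-map plus two independent
-- first-trigger-index + suffix-any checks (alternative decomposition, same O(n) cost).


-- ===== PORT A =====
def pvNorm (row : List (String × String)) : String :=
  PySem.Str.upper (((row.find? (fun kv => kv.1 == "process_state")).map Prod.snd).getD "")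

def pvStepA (st : Bool × Bool × Bool) (state : String) : Bool × Bool × Bool :=
  match st with
  | (s1, s2, suc) =>
    if state == "TRANSFER_1_TO_2" then (true, s2, suc)
    else if state == "TRANSFER_2_TO_1" then (s1, true, suc)
    else if state == "HEAT_TANK2" && s1 then (s1, s2, true)
    else if (state == "HEAT_TANK1" || state == "IDLE") && s2 then (s1, s2, true)
    else (s1, s2, suc)

-- A: one stateful sweep keeping (seen_transfer_1, seen_transfer_2, success)
def process_transfer_success_py (policy_rows : List (List (String × String))) : Bool :=
  (policy_rows.foldl (fun st row => pvStepA st (pvNorm row)) (false, false, false)).2.2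

-- ===== PORT B =====
-- B helper: first index of the trigger, then any() over the suffix strictly after it
def pvFired (states : List String) (trigger : String) (targets : List String) : Bool :=
  match PySem.List.index? states trigger with
  | none => false
  | some i => (states.drop (i + 1)).any (fun s => targets.contains s)

-- B: map rows to normalized states, then two independent trigger-index/suffix checks
def process_transfer_success_py_alt (policy_rows : List (List (String × String))) : Bool :=
  let states := policy_rows.map pvNorm
  pvFired states "TRANSFER_1_TO_2" ["HEAT_TANK2"]
    || pvFired states "TRANSFER_2_TO_1" ["HEAT_TANK1", "IDLE"]

-- ===== PRECONDITION & SPEC =====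
def Spec_process_transfer_success_py (policy_rows : List (List (String × String))) (out : Bool) : Prop := out = process_transfer_success_py_alt policy_rows
instance (policy_rows : List (List (String × String))) (out : Bool) : Decidable (Spec_process_transfer_success_py policy_rows out) := by unfold Spec_process_transfer_success_py; infer_instance

-- ===== CLAIM (what is proved, stated in full; the proofs are below) =====
def Claim_equal_process_transfer_success_py : Prop := ∀ (policy_rows : List (List (String × String))), Dom_process_transfer_success_py policy_rows → Spec_process_transfer_success_py policy_rows (process_transfer_success_py policy_rows)

-- ===== LEMMAS AND PROOFS =====
-- generic flag loop: 'seen' becomes true at the trigger; records a target seen while 'seen' holds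
def pvH (trigger : String) (targets : List String) : List String → Bool → Bool
  | [], _ => false
  | x :: xs, seen => (targets.contains x && seen) || pvH trigger targets xs (seen || x == trigger)

theorem pvStepA_eq (s1 s2 suc : Bool) (x : String) :
    pvStepA (s1, s2, suc) x =
      (s1 || x == "TRANSFER_1_TO_2", s2 || x == "TRANSFER_2_TO_1",
       suc || (List.contains ["HEAT_TANK2"] x && s1)
           || (List.contains ["HEAT_TANK1", "IDLE"] x && s2)) := by
  by_cases h1 : x = "TRANSFER_1_TO_2" <;>
  by_cases h2 : x = "TRANSFER_2_TO_1" <;>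
  by_cases h3 : x = "HEAT_TANK2" <;>
  by_cases h4 : x = "HEAT_TANK1" <;>
  by_cases h5 : x = "IDLE" <;>
    simp_all [pvStepA] <;> cases s1 <;> cases s2 <;> cases suc <;> simp

theorem foldA_eq (states : List String) (s1 s2 suc : Bool) :
    (states.foldl pvStepA (s1, s2, suc)).2.2 =
      (suc || pvH "TRANSFER_1_TO_2" ["HEAT_TANK2"] states s1
           || pvH "TRANSFER_2_TO_1" ["HEAT_TANK1", "IDLE"] states s2) := by
  induction states generalizing s1 s2 suc with
  | nil => simp [pvH]
  | cons x xs ih =>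
      simp only [List.foldl_cons, pvStepA_eq, ih, pvH]
      cases hx : (List.contains ["HEAT_TANK2"] x && s1) <;>
      cases hy : (List.contains ["HEAT_TANK1", "IDLE"] x && s2) <;>
        simp [Bool.or_assoc, Bool.or_comm, Bool.or_left_comm]

theorem pvH_true (trigger : String) (targets : List String) (states : List String) :
    pvH trigger targets states true = states.any (fun s => targets.contains s) := by
  induction states with
  | nil => simp [pvH]
  | cons x xs ih => simp [pvH, ih]

theorem pvH_false (trigger : String) (targets : List String) (states : List String) :
    pvH trigger targets states false = pvFired states trigger targets := by
  induction states with
  | nil => simp [pvH, pvFired, PySem.List.index?]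
  | cons x xs ih =>
      by_cases h : x = trigger
      · subst h
        rw [pvFired, PySem.List.index?_cons_self]
        simp [pvH, pvH_true]
      · have hb : (x == trigger) = false := by simp [h]
        simp only [pvH, hb, Bool.or_false, Bool.and_false, Bool.false_or, ih]
        rw [pvFired, pvFired, PySem.List.index?_cons_of_ne xs h]
        cases PySem.List.index? xs trigger <;> simp


-- ===== VERDICT (by name: the statement is the Claim_ definition above) =====
theorem process_transfer_success_py_spec : Claim_equal_process_transfer_success_py := by
  intro rows _
  unfold Spec_process_transfer_success_py process_transfer_success_py process_transfer_success_py_alt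
  rw [show (rows.foldl (fun st row => pvStepA st (pvNorm row)) (false, false, false))
        = ((rows.map pvNorm).foldl pvStepA (false, false, false)) by rw [List.foldl_map]]
  rw [foldA_eq, pvH_false, pvH_false]
  simp
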